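-- pv_equiv track=rewrite | github.com/gbodeen/algorhythmix | python/project-euler/PE051.py | makeReplacements
-- ===== SOURCE A (Python) =====
-- def makeReplacements(n, mask):
--   ns = str(n)
--   replacements = []
--   for d in range(0, 10):
--     nsa = list(ns)
--     bits = mask
--     i = 0
--     while (i < len(ns) and bits > 0):
--       if bits % 2 == 1:
--         nsa[i] = str(d)
--       i += 1
--       bits >>= 1
--     if nsa[0] != '0':
--       replacements.append(int(''.join(nsa)))
--   return replacements
-- ===== SOURCE B (Python) =====
-- def makeReplacements(n, mask):
--     ns = str(n)
--
--     def build(chars, bits):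
--         # list of 10 candidate strings (one per digit), built in one recursive
--         # traversal of the characters, consuming the mask bit by bit
--         if not chars:
--             return [''] * 10
--         tails = build(chars[1:], bits >> 1)
--         if bits > 0 and bits % 2 == 1:
--             return [str(d) + t for d, t in zip(range(10), tails)]
--         return [chars[0] + t for t in tails]
--
--     return [int(s) for s in build(ns, mask) if s[0] != '0']
-- ===== Notes on version B (the rewrite author's own statement) =====
-- stated objective: alternative
-- what changed: B builds all ten candidate strings simultaneously in one recursive traversal of the digit characters (consuming the mask bit by bit), then filters/parses them, instead of A's ten independent passes each re-scanning the mask with a while loop and in-place list mutation.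
import Mathlib
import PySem

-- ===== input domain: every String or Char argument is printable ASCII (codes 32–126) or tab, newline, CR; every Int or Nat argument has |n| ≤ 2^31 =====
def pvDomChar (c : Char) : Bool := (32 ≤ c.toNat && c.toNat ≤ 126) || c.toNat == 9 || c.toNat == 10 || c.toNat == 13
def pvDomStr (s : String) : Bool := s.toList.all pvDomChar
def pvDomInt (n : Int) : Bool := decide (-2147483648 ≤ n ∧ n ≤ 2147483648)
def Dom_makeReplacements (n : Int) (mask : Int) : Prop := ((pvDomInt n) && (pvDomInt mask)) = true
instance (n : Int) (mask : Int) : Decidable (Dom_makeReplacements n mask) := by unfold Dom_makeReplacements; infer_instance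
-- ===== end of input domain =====

-- B builds all ten candidate strings in one recursive traversal of the digit characters,
-- instead of A's ten independent mask-scanning passes; objective: alternative (same results).

-- ===== PORT A =====
-- A's inner while loop: 'while (i < len(ns) and bits > 0): if bits % 2 == 1: nsa[i] = str(d); i += 1; bits >>= 1'
-- (bits >>= 1 on an int is floor division by 2; exact)
def pvWhileA (len : Nat) (ds : String) (nsa : List String) (i : Nat) (bits : Int) : List String :=
  if _h : i < len ∧ 0 < bits then
    pvWhileA len ds (if PySem.Int.mod bits 2 = 1 then nsa.set i ds else nsa) (i + 1)
      (PySem.Int.floordiv bits 2)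
  else nsa
termination_by len - i
decreasing_by omega

def makeReplacements (n : Int) (mask : Int) : List Int :=
  let ns := (PySem.Int.toStr n).toList
  (PySem.List.pyRange 0 10 1).foldl (fun replacements d =>
    -- nsa = list(ns): a list of one-character strings
    let nsa := ns.map (fun c => String.ofList [c])
    let nsa := pvWhileA ns.length (PySem.Int.toStr d) nsa 0 mask
    if PySem.List.pyGet? nsa 0 ≠ some "0" then
      -- int(''.join(nsa)); the parse always succeeds here (digits, possibly a leading '-')
      replacements ++ [(PySem.Int.ofStr? (PySem.Str.join "" nsa)).getD 0]
    else replacements) []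

-- ===== PORT B =====
-- Source B's recursive helper 'build': one traversal of the characters, mask consumed bit by bit
-- ('bits >> 1' = floor division by 2, 'bits % 2 == 1' = Python's 'bits & 1'; str(d)+t is ported
-- as consing the digit character, exact since 0 ≤ d ≤ 9)
def pvBuildB (chars : List Char) (bits : Int) : List (List Char) :=
  match chars with
  | [] => List.replicate 10 []
  | x :: xs =>
    let tails := pvBuildB xs (PySem.Int.floordiv bits 2)
    if 0 < bits ∧ PySem.Int.mod bits 2 = 1 then
      (List.zip ['0','1','2','3','4','5','6','7','8','9'] tails).map (fun p => p.1 :: p.2)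
    else tails.map (fun t => x :: t)

-- '[int(s) for s in build(ns, mask) if s[0] != '0']'; s is never empty (str(n) is nonempty),
-- so s[0] is read as head?
def makeReplacements_alt (n : Int) (mask : Int) : List Int :=
  let ns := (PySem.Int.toStr n).toList
  ((pvBuildB ns mask).filter (fun s => s.head? != some '0')).map
    (fun s => (PySem.Int.ofStr? (String.ofList s)).getD 0)

-- ===== PRECONDITION & SPEC =====
def Spec_makeReplacements (n : Int) (mask : Int) (out : List Int) : Prop := out = makeReplacements_alt n mask
instance (n : Int) (mask : Int) (out : List Int) : Decidable (Spec_makeReplacements n mask out) := by unfold Spec_makeReplacements; infer_instance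

-- ===== CLAIM (what is proved, stated in full; the proofs are below) =====
def Claim_equal_makeReplacements : Prop := ∀ (n : Int) (mask : Int), Dom_makeReplacements n mask → Spec_makeReplacements n mask (makeReplacements n mask)

-- ===== LEMMAS AND PROOFS =====

-- spec-level single-digit replacement, by recursion on the characters
def pvRepl (chars : List Char) (bits : Int) (c : Char) : List Char :=
  match chars with
  | [] => []
  | x :: xs =>
    (if 0 < bits ∧ PySem.Int.mod bits 2 = 1 then c else x) :: pvRepl xs (PySem.Int.floordiv bits 2) c

lemma pvFd_nonpos (bits : Int) (h : bits ≤ 0) : PySem.Int.floordiv bits 2 ≤ 0 := by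
  rw [PySem.Int.floordiv_eq_ediv_of_pos (by norm_num)]
  omega

lemma pvRepl_nonpos (c : Char) : ∀ (chars : List Char) (bits : Int), bits ≤ 0 →
    pvRepl chars bits c = chars := by
  intro chars
  induction chars with
  | nil => intro bits _; rfl
  | cons x xs ih =>
    intro bits h
    simp only [pvRepl, if_neg (by omega : ¬ (0 < bits ∧ PySem.Int.mod bits 2 = 1))]
    rw [ih _ (pvFd_nonpos bits h)]

-- B's simultaneous build is the list of the ten single-digit replacements
lemma pvBuild_eq : ∀ (chars : List Char) (bits : Int),
    pvBuildB chars bits = ['0','1','2','3','4','5','6','7','8','9'].map (pvRepl chars bits) := by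
  intro chars
  induction chars with
  | nil => intro bits; rfl
  | cons x xs ih =>
    intro bits
    simp only [pvBuildB, ih]
    by_cases h : 0 < bits ∧ PySem.Int.mod bits 2 = 1
    · rw [if_pos h]
      simp only [pvRepl, if_pos h, List.map, List.zip, List.zipWith]
    · rw [if_neg h]
      simp only [pvRepl, if_neg h, List.map]

-- A's while loop on the suffix equals pvRepl on the suffix (singleton-string lists)
lemma pvWhile_eq_repl (c : Char) :
    ∀ (suf pre : List Char) (bits : Int),
      pvWhileA (pre.length + suf.length) (String.ofList [c])
          ((pre ++ suf).map (fun ch => String.ofList [ch])) pre.length bits =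
      ((pre ++ pvRepl suf bits c).map (fun ch => String.ofList [ch])) := by
  intro suf
  induction suf with
  | nil =>
    intro pre bits
    simp [pvWhileA, pvRepl]
  | cons x xs ih =>
    intro pre bits
    rw [pvWhileA]
    by_cases hb : 0 < bits
    · rw [dif_pos ⟨by simp, hb⟩]
      by_cases hm : PySem.Int.mod bits 2 = 1
      · rw [if_pos hm]
        have hset : ((pre ++ x :: xs).map (fun ch => String.ofList [ch])).set pre.length
            (String.ofList [c]) = ((pre ++ c :: xs).map (fun ch => String.ofList [ch])) := by
          rw [← List.map_set]
          congr 1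
          rw [List.set_append_right _ _ (le_refl _)]
          simp
        rw [hset]
        have h2 := ih (pre ++ [c]) (PySem.Int.floordiv bits 2)
        simp only [List.length_append, List.length_cons, List.length_nil, List.append_assoc,
          List.cons_append, List.nil_append] at h2 ⊢
        rw [show pre.length + (xs.length + 1) = pre.length + 1 + xs.length by omega, h2,
          pvRepl, if_pos ⟨hb, hm⟩]
      · rw [if_neg hm]
        have h2 := ih (pre ++ [x]) (PySem.Int.floordiv bits 2)
        simp only [List.length_append, List.length_cons, List.length_nil, List.append_assoc,
          List.cons_append, List.nil_append] at h2 ⊢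
        rw [show pre.length + (xs.length + 1) = pre.length + 1 + xs.length by omega, h2,
          pvRepl, if_neg (by tauto)]
    · rw [dif_neg (by tauto)]
      rw [pvRepl_nonpos c (x :: xs) bits (by omega)]

-- fold two lists with pairwise-equal step functions
lemma pvFoldl_congr {α β γ : Type} (f : α → β → α) (g : α → γ → α) :
    ∀ (xs : List β) (ys : List γ), List.Forall₂ (fun b c => ∀ a, f a b = g a c) xs ys →
    ∀ a, xs.foldl f a = ys.foldl g a := by
  intro xs ys h
  induction h with
  | nil => intro a; rfl
  | cons hbc _ ih => intro a; simp only [List.foldl]; rw [hbc a]; exact ih _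

lemma pvParse (l : List Char) :
    PySem.Int.ofStr? (PySem.Str.join "" (l.map (fun c => String.ofList [c]))) =
    PySem.Int.ofStr? (String.ofList l) := by
  show PySem.Int.ofChars? _ = PySem.Int.ofChars? _
  rw [PySem.Str.toList_join]
  simp only [List.map_map]
  have h1 : (List.map (String.toList ∘ fun c => String.ofList [c]) l) = l.map (fun c => [c]) := by
    simp [Function.comp]
  have h2 : ("" : String).toList = [] := rfl
  rw [h1, h2, PySem.Chars.join_nil_singletons]
  simp

lemma pvSingleton_eq_zero (c : Char) : (String.ofList [c] = "0") ↔ c = '0' := by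
  constructor
  · intro h
    have := congrArg String.toList h
    simpa using this
  · intro h; rw [h]

-- one iteration of A's digit loop equals B's per-string step on pvRepl ns mask c
lemma pvStep (ns : List Char) (mask d : Int) (c : Char)
    (hdc : PySem.Int.toStr d = String.ofList [c]) (rep : List Int) :
    (if PySem.List.pyGet? (pvWhileA ns.length (PySem.Int.toStr d)
          (ns.map (fun ch => String.ofList [ch])) 0 mask) 0 ≠ some "0" then
       rep ++ [(PySem.Int.ofStr? (PySem.Str.join "" (pvWhileA ns.length (PySem.Int.toStr d)
          (ns.map (fun ch => String.ofList [ch])) 0 mask))).getD 0]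
     else rep) =
    (if ((pvRepl ns mask c).head? != some '0') = true then
       rep ++ [(PySem.Int.ofStr? (String.ofList (pvRepl ns mask c))).getD 0]
     else rep) := by
  rw [hdc]
  have hw := pvWhile_eq_repl c ns [] mask
  simp only [List.length_nil, List.nil_append, Nat.zero_add] at hw
  rw [hw, pvParse]
  cases hns : pvRepl ns mask c with
  | nil => simp [PySem.List.pyGet?, PySem.List.pyIdx?]
  | cons c0 rest =>
    have hget : PySem.List.pyGet? ((c0 :: rest).map (fun ch => String.ofList [ch])) 0 =
        some (String.ofList [c0]) := by
      simp [PySem.List.pyGet?, PySem.List.pyIdx?]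
    rw [hget]
    by_cases hc0 : c0 = '0'
    · subst hc0; simp
    · rw [if_pos (by simp [pvSingleton_eq_zero, hc0]), if_pos (by simp [hc0])]

-- ===== VERDICT (by name: the statement is the Claim_ definition above) =====
theorem makeReplacements_spec : Claim_equal_makeReplacements := by
  intro n mask _
  simp only [Spec_makeReplacements, makeReplacements, makeReplacements_alt]
  have hrange : PySem.List.pyRange 0 10 1 = [0,1,2,3,4,5,6,7,8,9] := by decide
  rw [hrange, pvBuild_eq]
  refine Eq.trans (pvFoldl_congr _
      (fun out s => if (s.head? != some '0') = true then
        out ++ [(PySem.Int.ofStr? (String.ofList s)).getD 0] else out) _ _ ?_ [])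
    (Eq.trans (PySem.List.foldl_append_if _ _ _ _) (List.nil_append _))
  refine .cons (fun rep => pvStep _ mask 0 '0' (by decide) rep) ?_
  refine .cons (fun rep => pvStep _ mask 1 '1' (by decide) rep) ?_
  refine .cons (fun rep => pvStep _ mask 2 '2' (by decide) rep) ?_
  refine .cons (fun rep => pvStep _ mask 3 '3' (by decide) rep) ?_
  refine .cons (fun rep => pvStep _ mask 4 '4' (by decide) rep) ?_
  refine .cons (fun rep => pvStep _ mask 5 '5' (by decide) rep) ?_
  refine .cons (fun rep => pvStep _ mask 6 '6' (by decide) rep) ?_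
  refine .cons (fun rep => pvStep _ mask 7 '7' (by decide) rep) ?_
  refine .cons (fun rep => pvStep _ mask 8 '8' (by decide) rep) ?_
  refine .cons (fun rep => pvStep _ mask 9 '9' (by decide) rep) .nil
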